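-- pv_equiv track=rewrite | github.com/pedronery07/Academia-Python | quizzes/quiz5_2.py | quanto_tempo
-- ===== SOURCE A (Python) =====
-- def quanto_tempo(tempo):
--     caracteres = ['m', 's', 'h']
--     conta_tempo = {'h': 0, 's':0, 'm':0}
--     total = ''
--     # Percorre lista de tempos
--     for time in tempo:
--         t = ''
--         # Percorre digitos de cada tempo na lista
--         for digito in time:
--             # Verifica se é um número ou indicador de tempo
--             if digito in caracteres:
--                 t = int(t)
--                 # Insere no dicionário de tempos
--                 if digito == 'm':
--                     conta_tempo[digito] += t
--                 elif digito == 's':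
--                     conta_tempo[digito] += t
--                 elif digito == 'h':
--                     conta_tempo[digito] += t
--                 t = ''
--             else:
--                 t += digito
--     for j, k in conta_tempo.items():
--         while k > 59 and j == 's':
--             conta_tempo[j] -= 60
--             k -= 60
--             conta_tempo['m'] += 1
--         while k > 59 and j == 'm':
--             conta_tempo[j] -= 60
--             k -= 60
--             conta_tempo['h'] += 1
--     # Remove zeros, se existirem, e cria retorno
--     minutos = conta_tempo['m']
--     h = conta_tempo['h']
--     seg = conta_tempo['s']
--     l = [h, minutos, seg]
--     if l[0] != 0:
--         total += str(l[0]) + 'h'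
--     if l[1] != 0:
--         total += str(l[1]) + 'm'
--     if l[2] != 0:
--         total += str(l[2]) + 's'
--     return total
-- ===== SOURCE B (Python) =====
-- def quanto_tempo(tempo):
--     caracteres = ['m', 's', 'h']
--     total_seg = 0
--     # Same char-by-char parse (same int('')/bad-char errors), but a single
--     # integer of total seconds replaces the dict of three accumulators.
--     for time in tempo:
--         t = ''
--         for digito in time:
--             if digito in caracteres:
--                 n = int(t)
--                 if digito == 'h':
--                     total_seg += n * 3600
--                 elif digito == 'm':
--                     total_seg += n * 60
--                 else:
--                     total_seg += n
--                 t = ''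
--             else:
--                 t += digito
--     # One divmod decomposition instead of the carry while-loops.
--     h = total_seg // 3600
--     m = (total_seg % 3600) // 60
--     s = total_seg % 60
--     out = ''
--     if h != 0:
--         out += str(h) + 'h'
--     if m != 0:
--         out += str(m) + 'm'
--     if s != 0:
--         out += str(s) + 's'
--     return out
-- ===== Notes on version B (the rewrite author's own statement) =====
-- stated objective: simpler
-- what changed: B keeps the same char-by-char parse but accumulates one total-seconds integer (t*3600/t*60/t) instead of a dict of three counters, and replaces A's per-key carry while-loops over dict.items() by a single closed-form decomposition total//3600, (total%3600)//60, total%60.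
-- outside the precondition, e.g. on quanto_tempo(['-1s']): A returns '-1s', B returns '-1h59m59s'
import Mathlib
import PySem

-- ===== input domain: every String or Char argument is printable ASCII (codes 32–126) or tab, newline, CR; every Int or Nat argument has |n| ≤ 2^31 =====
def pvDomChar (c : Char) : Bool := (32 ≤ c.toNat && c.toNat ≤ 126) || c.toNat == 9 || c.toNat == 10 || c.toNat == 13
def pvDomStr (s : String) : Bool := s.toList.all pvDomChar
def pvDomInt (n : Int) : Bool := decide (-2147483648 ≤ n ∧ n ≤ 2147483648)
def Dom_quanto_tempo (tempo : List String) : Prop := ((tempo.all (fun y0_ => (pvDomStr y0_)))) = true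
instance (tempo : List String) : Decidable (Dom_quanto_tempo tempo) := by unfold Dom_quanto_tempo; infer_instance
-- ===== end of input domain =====

-- B replaces A's dict of three accumulators and its carry while-loops by a single total-seconds
-- integer decomposed once with // and % (simpler decomposition, same char-by-char parse).

-- ===== PORT A =====
-- 'digito in caracteres' with caracteres = ['m', 's', 'h']
def pvUnit (c : Char) : Bool := c == 'm' || c == 's' || c == 'h'

-- both Pythons end with the same three 'if x != 0: total += str(x) + unit' appends
def quantoRender (h m s : Int) : List Char :=
  (if h ≠ 0 then PySem.Int.toChars h ++ ['h'] else []) ++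
  (if m ≠ 0 then PySem.Int.toChars m ++ ['m'] else []) ++
  (if s ≠ 0 then PySem.Int.toChars s ++ ['s'] else [])

-- inner 'for digito in time' loop of A, state = (conta_tempo, t); returns the dict (t is dropped)
def quantoParseA (cs : List Char) (t : List Char) (d : PySem.Dict String Int) :
    PySem.Dict String Int :=
  match cs with
  | [] => d
  | c :: rest =>
    if pvUnit c then
      -- t = int(t); Pre_ excludes the inputs where Python raises ValueError here
      let v := (PySem.Int.ofChars? t).getD 0
      let d :=
        if c = 'm' then d.modify "m" 0 (· + v)
        else if c = 's' then d.modify "s" 0 (· + v)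
        else d.modify "h" 0 (· + v)
      quantoParseA rest [] d
    else quantoParseA rest (t ++ [c]) d

-- 'while k > 59 and j == "s"' loop
def whileS (j : String) (k : Int) (d : PySem.Dict String Int) :
    Int × PySem.Dict String Int :=
  if h : 59 < k ∧ j = "s" then
    whileS j (k - 60) ((d.modify j 0 (· - 60)).modify "m" 0 (· + 1))
  else (k, d)
termination_by (k - 59).toNat
decreasing_by omega

-- 'while k > 59 and j == "m"' loop
def whileM (j : String) (k : Int) (d : PySem.Dict String Int) :
    Int × PySem.Dict String Int :=
  if h : 59 < k ∧ j = "m" then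
    whileM j (k - 60) ((d.modify j 0 (· - 60)).modify "h" 0 (· + 1))
  else (k, d)
termination_by (k - 59).toNat
decreasing_by omega

-- 'for j, k in conta_tempo.items()' — the keys are "h", "s", "m" in insertion order
def quantoItems (d : PySem.Dict String Int) : PySem.Dict String Int :=
  ["h", "s", "m"].foldl (fun d j =>
    let k := d.getD j 0
    let kd := whileS j k d
    let kd2 := whileM j kd.1 kd.2
    kd2.2) d

def quanto_tempo (tempo : List String) : String :=
  let conta : PySem.Dict String Int := PySem.Dict.ofList [("h", 0), ("s", 0), ("m", 0)]
  let conta := tempo.foldl (fun d time => quantoParseA time.toList [] d) conta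
  let conta := quantoItems conta
  let minutos := conta.getD "m" 0
  let h := conta.getD "h" 0
  let seg := conta.getD "s" 0
  String.ofList (quantoRender h minutos seg)

-- ===== PORT B =====
-- inner parse loop of B, state = (total_seg, t); returns total_seg
def quantoParseB (cs : List Char) (t : List Char) (total : Int) : Int :=
  match cs with
  | [] => total
  | c :: rest =>
    if pvUnit c then
      let n := (PySem.Int.ofChars? t).getD 0
      let total :=
        if c = 'h' then total + n * 3600
        else if c = 'm' then total + n * 60
        else total + n
      quantoParseB rest [] total
    else quantoParseB rest (t ++ [c]) total

def quanto_tempo_alt (tempo : List String) : String :=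
  let total := tempo.foldl (fun tot time => quantoParseB time.toList [] tot) 0
  let h := PySem.Int.floordiv total 3600
  let m := PySem.Int.floordiv (PySem.Int.mod total 3600) 60
  let s := PySem.Int.mod total 60
  String.ofList (quantoRender h m s)

-- ===== PRECONDITION & SPEC =====
-- the substrings Python passes to int() are the fields of the string split at the
-- 'm'/'s'/'h' separators, except the trailing one (which is discarded, never parsed)
def pvTokOK (tok : List Char) : Bool := decide (0 ≤ (PySem.Int.ofChars? tok).getD (-1))

-- Pre_ excludes (a) inputs on which A raises ValueError (int('') or a non-numeric token before a
-- unit char), and (b) inputs with a negative time component, on which A's partially-carried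
-- mixed-sign output (e.g. '2h55m-1s') is an accident of its per-key carry loops and neither
-- A's nor B's fully normalized value is the specified one.
def Pre_quanto_tempo (tempo : List String) : Prop :=
  ∀ s ∈ tempo, ∀ tok ∈ (s.toList.splitOnP pvUnit).dropLast, pvTokOK tok = true

instance (tempo : List String) : Decidable (Pre_quanto_tempo tempo) := by
  unfold Pre_quanto_tempo; infer_instance

def pvWitness_quanto_tempo : List String := ["1h", "90m", "100s"]

def Spec_quanto_tempo (tempo : List String) (out : String) : Prop := out = quanto_tempo_alt tempo
instance (tempo : List String) (out : String) : Decidable (Spec_quanto_tempo tempo out) := by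
  unfold Spec_quanto_tempo; infer_instance

-- ===== CLAIM (what is proved, stated in full; the proofs are below) =====
def Claim_equal_quanto_tempo : Prop := ∀ (tempo : List String), Dom_quanto_tempo tempo → Pre_quanto_tempo tempo → Spec_quanto_tempo tempo (quanto_tempo tempo)

-- ===== LEMMAS AND PROOFS =====

-- proof-side restatement of the parsed tokens, following the parse loops' recursion
def pvTokens (cs : List Char) (t : List Char) : List (List Char) :=
  match cs with
  | [] => []
  | c :: rest => if pvUnit c then t :: pvTokens rest [] else pvTokens rest (t ++ [c])

theorem splitOnP_ne_nil (p : Char → Bool) (cs : List Char) : cs.splitOnP p ≠ [] := by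
  induction cs with
  | nil => simp [List.splitOnP_nil]
  | cons c rest ih =>
    rw [List.splitOnP_cons]
    by_cases hp : p c <;> simp [hp, ih]

theorem tokens_eq (cs : List Char) : ∀ t,
    pvTokens cs t = (((cs.splitOnP pvUnit).modifyHead (t ++ ·)).dropLast) := by
  induction cs with
  | nil => intro t; simp [pvTokens, List.splitOnP_nil]
  | cons c rest ih =>
    intro t
    rw [List.splitOnP_cons]
    by_cases hp : pvUnit c
    · obtain ⟨r0, rrest, hr⟩ : ∃ r0 rrest, rest.splitOnP pvUnit = r0 :: rrest := by
        cases h : rest.splitOnP pvUnit with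
        | nil => exact absurd h (splitOnP_ne_nil _ _)
        | cons r0 rrest => exact ⟨r0, rrest, rfl⟩
      simp [pvTokens, hp, ih [], hr]
    · simp only [pvTokens, hp, Bool.false_eq_true, if_false]
      rw [ih (t ++ [c]), List.modifyHead_modifyHead]
      have hf : ((t ++ ·) ∘ (c :: ·)) = ((t ++ [c]) ++ ·) := by
        funext x; simp
      rw [hf]

theorem tokens_eq_nil (cs : List Char) :
    pvTokens cs [] = (cs.splitOnP pvUnit).dropLast := by
  rw [tokens_eq]
  cases cs.splitOnP pvUnit with
  | nil => rfl
  | cons r0 rrest => simp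

-- parse invariant: A's dict components only grow, and B's running total grows by
-- 3600·Δh + 60·Δm + Δs
theorem parse_rel (cs : List Char) : ∀ (t : List Char) (d : PySem.Dict String Int) (total : Int),
    (∀ tok ∈ pvTokens cs t, pvTokOK tok = true) →
    d.getD "h" 0 ≤ (quantoParseA cs t d).getD "h" 0 ∧
    d.getD "m" 0 ≤ (quantoParseA cs t d).getD "m" 0 ∧
    d.getD "s" 0 ≤ (quantoParseA cs t d).getD "s" 0 ∧
    quantoParseB cs t total =
      total + 3600 * ((quantoParseA cs t d).getD "h" 0 - d.getD "h" 0)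
            + 60 * ((quantoParseA cs t d).getD "m" 0 - d.getD "m" 0)
            + ((quantoParseA cs t d).getD "s" 0 - d.getD "s" 0) := by
  induction cs with
  | nil => intro t d total _; simp [quantoParseA, quantoParseB]
  | cons c rest ih =>
    intro t d total htok
    by_cases hc : pvUnit c
    · have htokt : pvTokOK t = true := by
        apply htok; simp [pvTokens, hc]
      have htl : ∀ tok ∈ pvTokens rest [], pvTokOK tok = true := by
        intro tok htk; apply htok; simp [pvTokens, hc, htk]
      obtain ⟨v, hv, hv0⟩ : ∃ v, PySem.Int.ofChars? t = some v ∧ 0 ≤ v := by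
        unfold pvTokOK at htokt
        cases hv' : PySem.Int.ofChars? t with
        | none => simp [hv'] at htokt
        | some v => simp [hv'] at htokt; exact ⟨v, rfl, htokt⟩
      have hc3 : (c = 'm' ∨ c = 's') ∨ c = 'h' := by
        unfold pvUnit at hc; simpa using hc
      rcases hc3 with (hcm | hcs) | hch
      · subst hcm
        simp [quantoParseA, quantoParseB, pvUnit, hv]
        have := ih [] (d.modify "m" 0 (· + v)) (total + v * 60) htl
        simp [PySem.Dict.getD_modify] at this
        refine ⟨by omega, by omega, by omega, by omega⟩
      · subst hcs
        simp [quantoParseA, quantoParseB, pvUnit, hv]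
        have := ih [] (d.modify "s" 0 (· + v)) (total + v) htl
        simp [PySem.Dict.getD_modify] at this
        refine ⟨by omega, by omega, by omega, by omega⟩
      · subst hch
        simp [quantoParseA, quantoParseB, pvUnit, hv]
        have := ih [] (d.modify "h" 0 (· + v)) (total + v * 3600) htl
        simp [PySem.Dict.getD_modify] at this
        refine ⟨by omega, by omega, by omega, by omega⟩
    · have htl : ∀ tok ∈ pvTokens rest (t ++ [c]), pvTokOK tok = true := by
        intro tok htk; apply htok; simp [pvTokens, hc, htk]
      simp only [quantoParseA, quantoParseB, hc, Bool.false_eq_true, if_false]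
      exact ih (t ++ [c]) d total htl

theorem whileS_ne (j : String) (k : Int) (d : PySem.Dict String Int) (hj : j ≠ "s") :
    whileS j k d = (k, d) := by
  rw [whileS]; simp [hj]

theorem whileM_ne (j : String) (k : Int) (d : PySem.Dict String Int) (hj : j ≠ "m") :
    whileM j k d = (k, d) := by
  rw [whileM]; simp [hj]

theorem whileS_s (k : Int) (d : PySem.Dict String Int) (hk : 0 ≤ k) :
    (whileS "s" k d).1 = k % 60 ∧
    (whileS "s" k d).2.getD "s" 0 = d.getD "s" 0 - 60 * (k / 60) ∧
    (whileS "s" k d).2.getD "m" 0 = d.getD "m" 0 + k / 60 ∧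
    (whileS "s" k d).2.getD "h" 0 = d.getD "h" 0 := by
  fun_induction whileS "s" k d with
  | case1 k d h ih =>
    obtain ⟨i1, i2, i3, i4⟩ := ih (by omega)
    simp [PySem.Dict.getD_modify] at i2 i3 i4
    refine ⟨by omega, by omega, by omega, by omega⟩
  | case2 k d h =>
    simp at h
    refine ⟨by simp; omega, by simp; omega, by simp; omega, by simp⟩

theorem whileM_m (k : Int) (d : PySem.Dict String Int) (hk : 0 ≤ k) :
    (whileM "m" k d).1 = k % 60 ∧
    (whileM "m" k d).2.getD "m" 0 = d.getD "m" 0 - 60 * (k / 60) ∧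
    (whileM "m" k d).2.getD "h" 0 = d.getD "h" 0 + k / 60 ∧
    (whileM "m" k d).2.getD "s" 0 = d.getD "s" 0 := by
  fun_induction whileM "m" k d with
  | case1 k d h ih =>
    obtain ⟨i1, i2, i3, i4⟩ := ih (by omega)
    simp [PySem.Dict.getD_modify] at i2 i3 i4
    refine ⟨by omega, by omega, by omega, by omega⟩
  | case2 k d h =>
    simp at h
    refine ⟨by simp; omega, by simp; omega, by simp; omega, by simp⟩

-- the items() pass with nonnegative components is the divmod decomposition
theorem items_spec (d : PySem.Dict String Int)
    (hm : 0 ≤ d.getD "m" 0) (hs : 0 ≤ d.getD "s" 0) :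
    (quantoItems d).getD "h" 0 = d.getD "h" 0 + (d.getD "m" 0 + d.getD "s" 0 / 60) / 60 ∧
    (quantoItems d).getD "m" 0 = (d.getD "m" 0 + d.getD "s" 0 / 60) % 60 ∧
    (quantoItems d).getD "s" 0 = d.getD "s" 0 - 60 * (d.getD "s" 0 / 60) := by
  unfold quantoItems
  simp only [List.foldl_cons, List.foldl_nil]
  rw [whileS_ne "h" _ _ (by decide), whileM_ne "h" _ _ (by decide)]
  obtain ⟨s1, s2, s3, s4⟩ := whileS_s (d.getD "s" 0) d hs
  rw [whileM_ne "s" _ _ (by decide), whileS_ne "m" _ _ (by decide)]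
  obtain ⟨m1, m2, m3, m4⟩ := whileM_m ((whileS "s" (d.getD "s" 0) d).2.getD "m" 0)
      (whileS "s" (d.getD "s" 0) d).2 (by rw [s3]; omega)
  rw [m2, m3, m4, s2, s3, s4]
  refine ⟨rfl, by omega, rfl⟩

-- the outer 'for time in tempo' loops keep the same relation
theorem fold_rel (tempo : List String) : ∀ (d : PySem.Dict String Int) (total : Int),
    Pre_quanto_tempo tempo →
    d.getD "h" 0 ≤ (tempo.foldl (fun d time => quantoParseA time.toList [] d) d).getD "h" 0 ∧
    d.getD "m" 0 ≤ (tempo.foldl (fun d time => quantoParseA time.toList [] d) d).getD "m" 0 ∧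
    d.getD "s" 0 ≤ (tempo.foldl (fun d time => quantoParseA time.toList [] d) d).getD "s" 0 ∧
    tempo.foldl (fun tot time => quantoParseB time.toList [] tot) total =
      total + 3600 * ((tempo.foldl (fun d time => quantoParseA time.toList [] d) d).getD "h" 0 - d.getD "h" 0)
            + 60 * ((tempo.foldl (fun d time => quantoParseA time.toList [] d) d).getD "m" 0 - d.getD "m" 0)
            + ((tempo.foldl (fun d time => quantoParseA time.toList [] d) d).getD "s" 0 - d.getD "s" 0) := by
  induction tempo with
  | nil => intro d total _; simp
  | cons time rest ih =>
    intro d total hpre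
    have h1 := parse_rel time.toList [] d total
      (fun tok htk => hpre time (by simp) tok (tokens_eq_nil time.toList ▸ htk))
    have h2 := ih (quantoParseA time.toList [] d) (quantoParseB time.toList [] total)
      (fun s hs tok htk => hpre s (by simp [hs]) tok htk)
    simp only [List.foldl_cons]
    refine ⟨by omega, by omega, by omega, by omega⟩

-- ===== VERDICT (by name: the statement is the Claim_ definition above) =====
theorem quanto_tempo_spec : Claim_equal_quanto_tempo := by
  intro tempo _ hpre
  simp only [Spec_quanto_tempo, quanto_tempo, quanto_tempo_alt]
  obtain ⟨hh0, hm0, hs0, htotal⟩ :=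
    fold_rel tempo (PySem.Dict.ofList [("h", 0), ("s", 0), ("m", 0)]) 0 hpre
  have hinit : ((PySem.Dict.ofList [("h", 0), ("s", 0), ("m", 0)] : PySem.Dict String Int)).getD "h" 0 = 0 ∧
      ((PySem.Dict.ofList [("h", 0), ("s", 0), ("m", 0)] : PySem.Dict String Int)).getD "m" 0 = 0 ∧
      ((PySem.Dict.ofList [("h", 0), ("s", 0), ("m", 0)] : PySem.Dict String Int)).getD "s" 0 = 0 := by
    decide
  rw [hinit.1] at hh0 htotal
  rw [hinit.2.1] at hm0 htotal
  rw [hinit.2.2] at hs0 htotal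
  obtain ⟨i1, i2, i3⟩ := items_spec _ hm0 hs0
  rw [i1, i2, i3]
  rw [PySem.Int.floordiv_eq_ediv_of_pos (by norm_num),
      PySem.Int.floordiv_eq_ediv_of_pos (by norm_num),
      PySem.Int.mod_eq_emod_of_pos (by norm_num),
      PySem.Int.mod_eq_emod_of_pos (by norm_num)]
  set T := tempo.foldl (fun tot time => quantoParseB time.toList [] tot) 0 with hT
  set a := (tempo.foldl (fun d time => quantoParseA time.toList [] d)
      (PySem.Dict.ofList [("h", 0), ("s", 0), ("m", 0)])).getD "h" 0 with ha
  set b := (tempo.foldl (fun d time => quantoParseA time.toList [] d)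
      (PySem.Dict.ofList [("h", 0), ("s", 0), ("m", 0)])).getD "m" 0 with hb
  set c := (tempo.foldl (fun d time => quantoParseA time.toList [] d)
      (PySem.Dict.ofList [("h", 0), ("s", 0), ("m", 0)])).getD "s" 0 with hc
  rw [show a + (b + c / 60) / 60 = T / 3600 by omega,
      show (b + c / 60) % 60 = T % 3600 / 60 by omega,
      show c - 60 * (c / 60) = T % 60 by omega]
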